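-- pv_equiv track=rewrite | github.com/sohy19/Algorithm | 프로그래머스/택배 배달과 수거하기.py | solution
-- ===== SOURCE A (Python) =====
-- def solution(cap, n, deliveries, pickups):
--   answer = 0
--   deliver = 0   # 남은 배달 가능 개수
--   pick = 0   # 남은 수거 가능 개수
--   for i in range(n-1, -1, -1):
--     cnt = 0
--     while deliver < deliveries[i] or pick < pickups[i]:
--       cnt += 1
--       deliver += cap
--       pick += cap
--     deliver -= deliveries[i]
--     pick -= pickups[i]
--     answer += (i + 1) * cnt
--   return answer * 2
-- ===== SOURCE B (Python) =====
-- def solution(cap, n, deliveries, pickups):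
--     # Trips per stop computed in closed form by ceiling division instead of the inner while loop.
--     answer = 0
--     deliver = 0
--     pick = 0
--     for i in range(n - 1, -1, -1):
--         need = max(deliveries[i] - deliver, pickups[i] - pick)
--         cnt = -(-need // cap) if need > 0 else 0
--         answer += (i + 1) * cnt
--         deliver += cnt * cap - deliveries[i]
--         pick += cnt * cap - pickups[i]
--     return answer * 2
-- ===== Notes on version B (the rewrite author's own statement) =====
-- stated objective: alternative
-- what changed: The inner while loop that repeatedly adds cap until both deficits are covered is replaced by a closed-form ceiling division computing the number of trips per stop directly.
-- outside the precondition, e.g. on solution(0, 1, [0], [0]): A returns 0, B returns 0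
import Mathlib
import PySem

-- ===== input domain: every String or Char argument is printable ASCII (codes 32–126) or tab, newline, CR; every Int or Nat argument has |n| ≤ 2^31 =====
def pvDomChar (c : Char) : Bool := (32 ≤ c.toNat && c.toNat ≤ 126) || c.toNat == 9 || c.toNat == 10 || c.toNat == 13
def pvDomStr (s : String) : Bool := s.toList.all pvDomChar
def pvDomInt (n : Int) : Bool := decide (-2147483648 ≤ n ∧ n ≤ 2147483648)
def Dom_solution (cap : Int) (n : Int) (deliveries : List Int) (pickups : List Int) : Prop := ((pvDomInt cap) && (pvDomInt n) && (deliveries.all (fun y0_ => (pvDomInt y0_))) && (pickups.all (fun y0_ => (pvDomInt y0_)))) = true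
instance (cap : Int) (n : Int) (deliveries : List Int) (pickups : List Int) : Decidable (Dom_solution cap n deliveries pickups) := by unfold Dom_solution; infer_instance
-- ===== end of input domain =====

-- B replaces A's inner refill while-loop by a closed-form ceiling division per stop (alternative algorithm).

-- ===== PORT A =====
-- literal port of A's inner 'while deliver < deliveries[i] or pick < pickups[i]' loop;
-- fuel only makes it total: inside Pre_ (1 ≤ cap) the fuel supplied below is proved sufficient.
def whileA (cap d p : Int) (deliver pick cnt : Int) : Nat → Int × Int × Int
  | 0 => (deliver, pick, cnt)
  | fuel + 1 =>
      if deliver < d ∨ pick < p then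
        whileA cap d p (deliver + cap) (pick + cap) (cnt + 1) fuel
      else (deliver, pick, cnt)

def solution (cap : Int) (n : Int) (deliveries : List Int) (pickups : List Int) : Int :=
  ((PySem.List.pyRange (n - 1) (-1) (-1)).foldl
    (fun (st : Int × Int × Int) i =>
      let d := PySem.List.pyGetD deliveries i 0
      let p := PySem.List.pyGetD pickups i 0
      let w := whileA cap d p st.2.1 st.2.2 0 (max (d - st.2.1) (p - st.2.2)).toNat
      (st.1 + (i + 1) * w.2.2, w.1 - d, w.2.1 - p))
    (0, 0, 0)).1 * 2

-- ===== PORT B =====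
-- cnt = -(-need // cap) if need > 0 else 0
def ceilK (need cap : Int) : Int :=
  if 0 < need then -(PySem.Int.floordiv (-need) cap) else 0

def solution_alt (cap : Int) (n : Int) (deliveries : List Int) (pickups : List Int) : Int :=
  ((PySem.List.pyRange (n - 1) (-1) (-1)).foldl
    (fun (st : Int × Int × Int) i =>
      let need := max (PySem.List.pyGetD deliveries i 0 - st.2.1)
                      (PySem.List.pyGetD pickups i 0 - st.2.2)
      let cnt := ceilK need cap
      (st.1 + (i + 1) * cnt,
       st.2.1 + (cnt * cap - PySem.List.pyGetD deliveries i 0),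
       st.2.2 + (cnt * cap - PySem.List.pyGetD pickups i 0)))
    (0, 0, 0)).1 * 2

-- ===== PRECONDITION & SPEC =====
-- Pre_ excludes (a) n exceeding a list length, where A raises IndexError, and (b) cap ≤ 0 with
-- 0 < n, where A's refill loop diverges whenever some demand is positive (on the remaining
-- all-nonpositive-demand inputs A happens to return 0, which B also returns, but they are excluded
-- with the whole cap ≤ 0 region).
def Pre_solution (cap : Int) (n : Int) (deliveries : List Int) (pickups : List Int) : Prop :=
  n ≤ 0 ∨ (1 ≤ cap ∧ n ≤ (deliveries.length : Int) ∧ n ≤ (pickups.length : Int))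
instance (cap : Int) (n : Int) (deliveries : List Int) (pickups : List Int) : Decidable (Pre_solution cap n deliveries pickups) := by unfold Pre_solution; infer_instance

def pvWitness_solution : Int × Int × List Int × List Int := (4, 3, [2, 5, 0], [1, 0, 6])

def Spec_solution (cap : Int) (n : Int) (deliveries : List Int) (pickups : List Int) (out : Int) : Prop := out = solution_alt cap n deliveries pickups
instance (cap : Int) (n : Int) (deliveries : List Int) (pickups : List Int) (out : Int) : Decidable (Spec_solution cap n deliveries pickups out) := by unfold Spec_solution; infer_instance

-- ===== CLAIM (what is proved, stated in full; the proofs are below) =====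
def Claim_equal_solution : Prop := ∀ (cap : Int) (n : Int) (deliveries : List Int) (pickups : List Int), Dom_solution cap n deliveries pickups → Pre_solution cap n deliveries pickups → Spec_solution cap n deliveries pickups (solution cap n deliveries pickups)

-- ===== LEMMAS AND PROOFS =====

theorem ceilK_of_nonpos (need cap : Int) (h : ¬ 0 < need) : ceilK need cap = 0 := by
  simp [ceilK, h]

theorem ceilK_spec (need cap : Int) (hcap : 0 < cap) (h : 0 < need) :
    (ceilK need cap - 1) * cap < need ∧ need ≤ ceilK need cap * cap := by
  have hK : ceilK need cap = -(PySem.Int.floordiv (-need) cap) := by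
    simp [ceilK, h]
  have := (PySem.Int.neg_floordiv_neg_eq_iff_of_pos (a := need) (b := cap)
    (q := -(PySem.Int.floordiv (-need) cap)) hcap).mp rfl
  rw [hK]
  exact this

theorem ceilK_pos (need cap : Int) (hcap : 0 < cap) (h : 0 < need) : 1 ≤ ceilK need cap := by
  obtain ⟨_, h2⟩ := ceilK_spec need cap hcap h
  by_contra hK
  push Not at hK
  have : ceilK need cap * cap ≤ 0 :=
    mul_nonpos_of_nonpos_of_nonneg (by omega) (le_of_lt hcap)
  omega

theorem ceilK_le (need cap : Int) (hcap : 1 ≤ cap) (h : 0 < need) : ceilK need cap ≤ need := by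
  obtain ⟨h1, _⟩ := ceilK_spec need cap (by omega) h
  have hk := ceilK_pos need cap (by omega) h
  nlinarith

theorem ceilK_pred (need cap : Int) (hcap : 0 < cap) (h : 0 < need) :
    ceilK (need - cap) cap = ceilK need cap - 1 := by
  obtain ⟨h1, h2⟩ := ceilK_spec need cap hcap h
  have hKdef : ceilK need cap = -(PySem.Int.floordiv (-need) cap) := by
    simp [ceilK, h]
  by_cases h' : 0 < need - cap
  · have hdef' : ceilK (need - cap) cap = -(PySem.Int.floordiv (-(need - cap)) cap) := by
      unfold ceilK; rw [if_pos h']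
    rw [hdef', hKdef, PySem.Int.neg_floordiv_neg_eq_iff_of_pos hcap]
    rw [hKdef] at h1 h2
    constructor <;> nlinarith
  · have hz : ceilK (need - cap) cap = 0 := ceilK_of_nonpos _ _ h'
    have hk := ceilK_pos need cap hcap h
    have : ceilK need cap = 1 := by nlinarith
    omega

theorem whileA_eq (cap d p : Int) (hcap : 1 ≤ cap) :
    ∀ (fuel : Nat) (dl pk c : Int),
      (ceilK (max (d - dl) (p - pk)) cap).toNat ≤ fuel →
      whileA cap d p dl pk c fuel =
        (dl + ceilK (max (d - dl) (p - pk)) cap * cap,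
         pk + ceilK (max (d - dl) (p - pk)) cap * cap,
         c + ceilK (max (d - dl) (p - pk)) cap) := by
  intro fuel
  induction fuel with
  | zero =>
      intro dl pk c hf
      have hK : ceilK (max (d - dl) (p - pk)) cap = 0 := by
        by_cases h : 0 < max (d - dl) (p - pk)
        · have := ceilK_pos _ cap (by omega) h; omega
        · exact ceilK_of_nonpos _ _ h
      simp [whileA, hK]
  | succ fuel ih =>
      intro dl pk c hf
      by_cases hcond : dl < d ∨ pk < p
      · have hneed : 0 < max (d - dl) (p - pk) := by
          rcases hcond with h | h
          · exact lt_max_of_lt_left (by omega)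
          · exact lt_max_of_lt_right (by omega)
        have hmax : max (d - (dl + cap)) (p - (pk + cap)) = max (d - dl) (p - pk) - cap := by
          omega
        have hpred := ceilK_pred (max (d - dl) (p - pk)) cap (by omega) hneed
        have hk1 := ceilK_pos (max (d - dl) (p - pk)) cap (by omega) hneed
        have hrec := ih (dl + cap) (pk + cap) (c + 1)
          (by rw [hmax, hpred]; omega)
        rw [whileA, if_pos hcond, hrec, hmax, hpred]
        refine Prod.ext ?_ (Prod.ext ?_ ?_) <;> simp <;> ring
      · have hneed : ¬ 0 < max (d - dl) (p - pk) := by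
          push Not at hcond ⊢
          omega
        have hK := ceilK_of_nonpos (max (d - dl) (p - pk)) cap hneed
        rw [whileA, if_neg hcond, hK]
        simp

theorem step_eq (cap : Int) (deliveries pickups : List Int) (hcap : 1 ≤ cap)
    (st : Int × Int × Int) (i : Int) :
    (fun (st : Int × Int × Int) i =>
      let d := PySem.List.pyGetD deliveries i 0
      let p := PySem.List.pyGetD pickups i 0
      let w := whileA cap d p st.2.1 st.2.2 0 (max (d - st.2.1) (p - st.2.2)).toNat
      (st.1 + (i + 1) * w.2.2, w.1 - d, w.2.1 - p)) st i =
    (fun (st : Int × Int × Int) i =>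
      let need := max (PySem.List.pyGetD deliveries i 0 - st.2.1)
                      (PySem.List.pyGetD pickups i 0 - st.2.2)
      let cnt := ceilK need cap
      (st.1 + (i + 1) * cnt,
       st.2.1 + (cnt * cap - PySem.List.pyGetD deliveries i 0),
       st.2.2 + (cnt * cap - PySem.List.pyGetD pickups i 0))) st i := by
  simp only
  set d := PySem.List.pyGetD deliveries i 0
  set p := PySem.List.pyGetD pickups i 0
  have hfuel : (ceilK (max (d - st.2.1) (p - st.2.2)) cap).toNat ≤
      (max (d - st.2.1) (p - st.2.2)).toNat := by
    by_cases h : 0 < max (d - st.2.1) (p - st.2.2)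
    · have := ceilK_le _ cap hcap h; omega
    · rw [ceilK_of_nonpos _ _ h]; omega
  rw [whileA_eq cap d p hcap _ _ _ _ hfuel]
  refine Prod.ext ?_ (Prod.ext ?_ ?_) <;> simp <;> ring

-- ===== VERDICT (by name: the statement is the Claim_ definition above) =====
theorem solution_spec : Claim_equal_solution := by
  intro cap n deliveries pickups _ hpre
  unfold Spec_solution solution solution_alt
  rcases hpre with hn | ⟨hcap, _, _⟩
  · rw [PySem.List.pyRange_neg_one_eq_nil (by omega)]
    rfl
  · exact congrArg (fun x => x.1 * 2)
      (List.foldl_ext _ _ _ (fun a b _ => step_eq cap deliveries pickups hcap a b))
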